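-- pv_equiv track=rewrite | github.com/itisluiz/dayz-ss-collector | scripts/validate_dataset.py | _fmt_ranges
-- ===== SOURCE A (Python) =====
-- def _fmt_ranges(indices: list[int]) -> str:
--     if not indices:
--         return ""
--     segs = []
--     s = e = indices[0]
--     for i in indices[1:]:
--         if i == e + 1:
--             e = i
--         else:
--             segs.append(str(s) if s == e else f"{s}–{e}")
--             s = e = i
--     segs.append(str(s) if s == e else f"{s}–{e}")
--     return ", ".join(segs)
-- ===== SOURCE B (Python) =====
-- def _fmt_ranges(indices: list[int]) -> str:
--     # Phase 1: group into maximal consecutive runs, built back-to-front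
--     # (newest run kept at the end of `runs`, output read reversed).
--     runs = []
--     for x in reversed(indices):
--         if runs and runs[-1][0] == x + 1:
--             runs[-1] = (x, runs[-1][1])
--         else:
--             runs.append((x, x))
--     # Phase 2: format each run, then join.
--     return ", ".join(_seg(s, e) for s, e in reversed(runs))
--
--
-- def _seg(s: int, e: int) -> str:
--     return str(s) if s == e else f"{s}–{e}"
-- ===== Notes on version B (the rewrite author's own statement) =====
-- stated objective: alternative
-- what changed: B separates grouping from formatting: a reversed pass builds the list of maximal consecutive runs as (start,end) pairs by merging back-to-front, then formatting is mapped over the runs and joined, instead of A's single forward loop with a running s/e accumulator that emits segments inline.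
import Mathlib
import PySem

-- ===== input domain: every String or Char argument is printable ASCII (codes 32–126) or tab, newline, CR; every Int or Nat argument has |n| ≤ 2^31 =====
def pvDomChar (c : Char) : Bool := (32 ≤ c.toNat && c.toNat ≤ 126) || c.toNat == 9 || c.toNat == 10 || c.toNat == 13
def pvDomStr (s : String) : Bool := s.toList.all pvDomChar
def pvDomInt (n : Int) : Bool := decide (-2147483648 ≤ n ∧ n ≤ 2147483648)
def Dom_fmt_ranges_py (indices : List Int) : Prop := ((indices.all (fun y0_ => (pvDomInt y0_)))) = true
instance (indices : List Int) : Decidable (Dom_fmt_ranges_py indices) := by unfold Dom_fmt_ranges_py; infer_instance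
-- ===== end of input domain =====

-- ===== PORT A =====
-- segment formatting: str(s) if s == e else f"{s}–{e}"
def pvFmtA (s e : Int) : String :=
  if s == e then PySem.Int.toStr s else PySem.Int.toStr s ++ "–" ++ PySem.Int.toStr e

-- the body of A's for-loop, on state (segs, s, e)
def pvStepA (acc : List String × Int × Int) (i : Int) : List String × Int × Int :=
  if i == acc.2.2 + 1 then (acc.1, acc.2.1, i)
  else (acc.1 ++ [pvFmtA acc.2.1 acc.2.2], i, i)

def fmt_ranges_py (indices : List Int) : String :=
  match indices with
  | [] => ""
  | x :: xs =>
    let st := xs.foldl pvStepA ([], x, x)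
    PySem.Str.join ", " (st.1 ++ [pvFmtA st.2.1 st.2.2])

-- ===== PORT B =====
-- _seg of Source B
def pvSeg (s e : Int) : String :=
  if s == e then PySem.Int.toStr s else PySem.Int.toStr s ++ "–" ++ PySem.Int.toStr e

-- the body of Source B's loop over reversed(indices): merge x into the newest run or open a new
-- one; the Lean list head is Python's runs[-1], so the reversed loop plus the final reversed
-- read is realised as structural recursion with pvMerge applied front-side.
def pvMerge (x : Int) (r : List (Int × Int)) : List (Int × Int) :=
  match r with
  | (s, e) :: rt => if s == x + 1 then (x, e) :: rt else (x, x) :: (s, e) :: rt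
  | [] => [(x, x)]

def pvRuns : List Int → List (Int × Int)
  | [] => []
  | x :: xs => pvMerge x (pvRuns xs)

def fmt_ranges_py_alt (indices : List Int) : String :=
  PySem.Str.join ", " ((pvRuns indices).map (fun p => pvSeg p.1 p.2))

-- ===== PRECONDITION & SPEC =====
def Spec_fmt_ranges_py (indices : List Int) (out : String) : Prop := out = fmt_ranges_py_alt indices
instance (indices : List Int) (out : String) : Decidable (Spec_fmt_ranges_py indices out) := by unfold Spec_fmt_ranges_py; infer_instance

-- ===== CLAIM (what is proved, stated in full; the proofs are below) =====
def Claim_equal_fmt_ranges_py : Prop := ∀ (indices : List Int), Dom_fmt_ranges_py indices → Spec_fmt_ranges_py indices (fmt_ranges_py indices)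

-- ===== LEMMAS AND PROOFS =====

-- pure form of A's loop: the (s, e) runs it delimits
def pvRunsA (s e : Int) : List Int → List (Int × Int)
  | [] => [(s, e)]
  | i :: t => if i = e + 1 then pvRunsA s i t else (s, e) :: pvRunsA i i t

-- extending a ready run list with the pending run (s, e)
def pvExtend (s e : Int) (r : List (Int × Int)) : List (Int × Int) :=
  match r with
  | [] => [(s, e)]
  | (s', e') :: rt => if s' = e + 1 then (s, e') :: rt else (s, e) :: (s', e') :: rt

theorem pvLoopA_eq (xs : List Int) (segs : List String) (s e : Int) :
    (xs.foldl pvStepA (segs, s, e)).1 ++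
      [pvFmtA (xs.foldl pvStepA (segs, s, e)).2.1 (xs.foldl pvStepA (segs, s, e)).2.2] =
    segs ++ (pvRunsA s e xs).map (fun p => pvFmtA p.1 p.2) := by
  induction xs generalizing segs s e with
  | nil => simp [pvRunsA]
  | cons i t ih =>
    rw [List.foldl_cons]
    by_cases h : i = e + 1
    · have hs : pvStepA (segs, s, e) i = (segs, s, i) := by simp [pvStepA, h]
      rw [hs, ih, pvRunsA, if_pos h]
    · have hs : pvStepA (segs, s, e) i = (segs ++ [pvFmtA s e], i, i) := by simp [pvStepA, h]
      rw [hs, ih, pvRunsA, if_neg h]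
      simp

theorem pvExtend_merge (s e i : Int) (r : List (Int × Int)) :
    pvExtend s e (pvMerge i r) =
      if i = e + 1 then pvExtend s i r else (s, e) :: pvMerge i r := by
  cases r with
  | nil => by_cases h : i = e + 1 <;> simp [pvMerge, pvExtend, h]
  | cons p rt =>
    obtain ⟨s', e'⟩ := p
    by_cases h : i = e + 1
    · subst h
      by_cases h2 : s' = e + 1 + 1 <;> simp [pvMerge, pvExtend, h2]
    · by_cases h2 : s' = i + 1 <;> simp [pvMerge, pvExtend, h, h2]

theorem pvExtend_self (i : Int) (r : List (Int × Int)) :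
    pvExtend i i r = pvMerge i r := by
  cases r with
  | nil => simp [pvExtend, pvMerge]
  | cons p rt =>
    obtain ⟨s', e'⟩ := p
    by_cases h2 : s' = i + 1 <;> simp [pvExtend, pvMerge, h2]

theorem pvRunsA_eq (xs : List Int) (s e : Int) :
    pvRunsA s e xs = pvExtend s e (pvRuns xs) := by
  induction xs generalizing s e with
  | nil => simp [pvRunsA, pvRuns, pvExtend]
  | cons i t ih =>
    rw [pvRuns, pvExtend_merge, pvRunsA]
    by_cases h : i = e + 1
    · rw [if_pos h, if_pos h, ih]
    · rw [if_neg h, if_neg h, ih, pvExtend_self]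

-- ===== VERDICT (by name: the statement is the Claim_ definition above) =====
theorem fmt_ranges_py_spec : Claim_equal_fmt_ranges_py := by
  intro indices _
  unfold Spec_fmt_ranges_py fmt_ranges_py fmt_ranges_py_alt
  cases indices with
  | nil => rfl
  | cons x xs =>
    simp only []
    rw [pvLoopA_eq xs [] x x, List.nil_append, pvRunsA_eq, pvExtend_self]
    rfl
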